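-- pv_equiv track=rewrite | github.com/itmartem/discr_v2 | main2.py | huffman_process
-- ===== SOURCE A (Python) =====
-- import heapq
-- from collections import Counter
--
-- def build_tree(t):
--     f = Counter(t)
--     h = [(c, s if s is not None else '', None, None) for s, c in f.items()]
--     heapq.heapify(h)
--
--     while len(h) > 1:
--         l = heapq.heappop(h)
--         r = heapq.heappop(h)
--         n = (l[0] + r[0], '', l, r)
--         heapq.heappush(h, n)
--     return h[0]
--
-- def generate_huffman_codes(n, p="", m=None):
--     if m is None:
--         m = {}
--
--     if n[1]:
--         m[n[1]] = p
--     else: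
--         generate_huffman_codes(n[2], p + "0", m)
--         generate_huffman_codes(n[3], p + "1", m)
--     return m
--
-- def encode_text(t, m):
--     return ''.join(m[c] for c in t)
--
-- def decode_text(e, m):
--     d = []
--     c = ""
--     for b in e:
--         c += b
--         if c in m:
--             d.append(m[c])
--             c = ""
--     return ''.join(d)
--
-- def huffman_process(t):
--     if not t:
--         raise ValueError("Нет текста")
--
--     r = build_tree(t)
--     m = generate_huffman_codes(r)
--     e = encode_text(t, m)
--     d = decode_text(e, {v: k for k, v in m.items()})
--     return m, e, d
-- ===== SOURCE B (Python) =====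
-- from collections import Counter
--
-- def huffman_process(t):
--     if not t:
--         raise ValueError("Нет текста")
--
--     # build the tree by repeated selection of the two smallest nodes from a
--     # sorted list (same node tuples and the same total order as a heap would use)
--     f = Counter(t)
--     nodes = [(c, s, None, None) for s, c in f.items()]
--     while len(nodes) > 1:
--         nodes.sort()
--         l, r = nodes[0], nodes[1]
--         nodes = nodes[2:]
--         nodes.append((l[0] + r[0], '', l, r))
--     root = nodes[0]
--
--     # iterative code generation with an explicit stack (left-first DFS)
--     m = {}
--     stack = [(root, "")]
--     while stack:
--         n, p = stack.pop()
--         if n[1]: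
--             m[n[1]] = p
--         else:
--             stack.append((n[3], p + "1"))
--             stack.append((n[2], p + "0"))
--
--     e = ''.join(m[c] for c in t)
--
--     inv = {v: k for k, v in m.items()}
--     d = []
--     c = ""
--     for b in e:
--         c += b
--         if c in inv:
--             d.append(inv[c])
--             c = ""
--     return m, e, ''.join(d)
-- ===== Notes on version B (the rewrite author's own statement) =====
-- stated objective: alternative
-- what changed: Tree construction selects the two smallest nodes from a re-sorted list instead of a binary heap (the node order is total, so the selection is identical), and code generation uses an explicit stack instead of recursion.
import Mathlib
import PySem

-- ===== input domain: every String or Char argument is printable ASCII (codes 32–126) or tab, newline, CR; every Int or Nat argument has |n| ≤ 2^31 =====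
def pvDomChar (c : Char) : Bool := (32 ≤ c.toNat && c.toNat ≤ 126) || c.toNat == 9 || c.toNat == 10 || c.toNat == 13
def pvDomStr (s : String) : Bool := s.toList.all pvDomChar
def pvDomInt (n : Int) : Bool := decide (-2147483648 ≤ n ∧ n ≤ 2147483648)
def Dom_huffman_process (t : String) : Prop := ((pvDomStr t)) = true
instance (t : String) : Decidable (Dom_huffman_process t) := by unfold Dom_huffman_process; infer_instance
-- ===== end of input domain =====

-- B replaces the binary heap by re-sorting the node list and taking the two smallest
-- (identical selection: the node order is total) and generates codes with an explicit
-- stack instead of recursion; decode is unchanged. Objective: alternative (not faster).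

-- Huffman node: the Python tuple (count, symbol, left, right); `nil` is Python's None child.
inductive HTree : Type where
  | nil : HTree
  | node : Int → String → HTree → HTree → HTree
deriving DecidableEq, Repr

def HTree.count : HTree → Int
  | .nil => 0
  | .node c _ _ _ => c

-- Python's comparison on these tuples (lexicographic; strings by code point).
def intCmp (a b : Int) : Ordering :=
  if a < b then .lt else if b < a then .gt else .eq

def charCmp (a b : Char) : Ordering :=
  if a.toNat < b.toNat then .lt else if b.toNat < a.toNat then .gt else .eq

def charsCmp : List Char → List Char → Ordering
  | [], [] => .eq
  | [], _ :: _ => .lt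
  | _ :: _, [] => .gt
  | a :: as, b :: bs =>
    match charCmp a b with
    | .lt => .lt
    | .gt => .gt
    | .eq => charsCmp as bs

-- nil vs node never happens in a live comparison (symbols distinguish leaves from
-- internal nodes first; in Python that comparison would raise TypeError): any value is fine.
def treeCmp : HTree → HTree → Ordering
  | .nil, .nil => .eq
  | .nil, .node _ _ _ _ => .lt
  | .node _ _ _ _, .nil => .gt
  | .node c s l r, .node c' s' l' r' =>
    match intCmp c c' with
    | .lt => .lt
    | .gt => .gt
    | .eq =>
      match charsCmp s.toList s'.toList with
      | .lt => .lt
      | .gt => .gt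
      | .eq =>
        match treeCmp l l' with
        | .lt => .lt
        | .gt => .gt
        | .eq => treeCmp r r'

def treeLe (a b : HTree) : Bool := treeCmp a b != Ordering.gt

-- ===== PORT A =====
-- Counter(t).items() in first-occurrence order, one leaf per symbol (chars as 1-char strings).
def initNodesA (t : String) : List HTree :=
  (PySem.Dict.counter (t.toList.map (fun ch => String.singleton ch))).items.map
    (fun p => HTree.node p.2 p.1 .nil .nil)

-- heappop ported as extraction of the first minimal element: exact here, because the
-- tuple order on live nodes is total (heapify only reorders, the popped VALUE is the minimum).
def popmin : List HTree → Option (HTree × List HTree)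
  | [] => none
  | x :: xs =>
    match popmin xs with
    | none => some (x, [])
    | some (m, rest) => if treeCmp m x = .lt then some (m, x :: rest) else some (x, xs)

theorem popmin_cons_isSome (x : HTree) (xs : List HTree) : (popmin (x :: xs)).isSome := by
  simp only [popmin]
  cases popmin xs with
  | none => simp
  | some p => obtain ⟨m, rest⟩ := p; by_cases h : treeCmp m x = .lt <;> simp [h]

theorem popmin_length : ∀ {l : List HTree} {m : HTree} {rest : List HTree},
    popmin l = some (m, rest) → rest.length + 1 = l.length := by
  intro l
  induction l with
  | nil => intro m rest h; simp [popmin] at h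
  | cons x xs ih =>
    intro m rest h
    simp only [popmin] at h
    cases hp : popmin xs with
    | none =>
      rw [hp] at h
      simp at h
      cases xs with
      | nil => have h2 := h.2; subst h2; simp
      | cons y ys =>
        exfalso; have := popmin_cons_isSome y ys; rw [hp] at this; simp at this
    | some p =>
      obtain ⟨m', rest'⟩ := p
      rw [hp] at h
      dsimp only [] at h
      have hlen := ih hp
      by_cases hc : treeCmp m' x = .lt
      · rw [if_pos hc, Option.some.injEq, Prod.mk.injEq] at h
        obtain ⟨_, h2⟩ := h
        subst h2
        simp only [List.length_cons] at *
        omega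
      · rw [if_neg hc, Option.some.injEq, Prod.mk.injEq] at h
        obtain ⟨_, h2⟩ := h
        subst h2
        simp

-- while len(h) > 1: pop two minima, push the merged node; finally h[0].
def loopA (h : List HTree) : HTree :=
  if hlen : h.length ≤ 1 then h.headD .nil
  else
    match hp : popmin h with
    | none => .nil
    | some (l, h1) =>
      match hp2 : popmin h1 with
      | none => .nil
      | some (r, h2) => loopA (h2 ++ [HTree.node (l.count + r.count) "" l r])
termination_by h.length
decreasing_by
  have e1 := popmin_length hp
  have e2 := popmin_length hp2
  simp only [List.length_append, List.length_cons, List.length_nil]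
  omega

def build_tree (t : String) : HTree := loopA (initNodesA t)

-- generate_huffman_codes: recursive DFS, left with p+"0" first, then right with p+"1".
def genA : HTree → String → PySem.Dict String String → PySem.Dict String String
  | .nil, _, m => m
  | .node _ s l r, p, m =>
    if s ≠ "" then m.insert s p
    else genA r (p ++ "1") (genA l (p ++ "0") m)

-- encode_text: m[c] never misses a key (every char of t is a leaf symbol), so getD "" is exact.
def encodeA (t : String) (m : PySem.Dict String String) : String :=
  PySem.Str.join "" (t.toList.map (fun ch => (m.get? (String.singleton ch)).getD ""))

-- {v: k for k, v in m.items()}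
def invA (m : PySem.Dict String String) : PySem.Dict String String :=
  m.items.foldl (fun d p => d.insert p.2 p.1) PySem.Dict.empty

-- decode_text: grow a prefix, emit on dict hit ('c in m' then m[c]: getD exact on a hit).
def decodeA (e : String) (inv : PySem.Dict String String) : String :=
  let st := e.toList.foldl
    (fun (acc : List String × String) b =>
      let c := acc.2.push b
      if inv.contains c then (acc.1 ++ [(inv.get? c).getD ""], "") else (acc.1, c))
    ([], "")
  PySem.Str.join "" st.1

def huffman_process (t : String) : (List (String × String)) × String × String :=
  let r := build_tree t
  let m := genA r "" PySem.Dict.empty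
  let e := encodeA t m
  let d := decodeA e (invA m)
  (m.items, e, d)

-- ===== PORT B =====
def initNodesB (t : String) : List HTree :=
  (PySem.Dict.counter (t.toList.map (fun ch => String.singleton ch))).items.map
    (fun p => HTree.node p.2 p.1 .nil .nil)

-- while len(nodes) > 1: nodes.sort(); take nodes[0], nodes[1]; nodes = nodes[2:] + [merged].
-- list.sort() ported as stable mergeSort under the same tuple order.
def loopB (nodes : List HTree) : HTree :=
  if hlen : nodes.length ≤ 1 then nodes.headD .nil
  else
    match hs : nodes.mergeSort treeLe with
    | a :: b :: rest => loopB (rest ++ [HTree.node (a.count + b.count) "" a b])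
    | _ => .nil
termination_by nodes.length
decreasing_by
  have e1 : (nodes.mergeSort treeLe).length = nodes.length := List.length_mergeSort nodes
  rw [hs] at e1
  simp only [List.length_append, List.length_cons, List.length_nil] at *
  omega

def HTree.size : HTree → Nat
  | .nil => 1
  | .node _ _ l r => 1 + l.size + r.size

-- explicit stack: pop (n, p); emit leaves; else push (l, p+"0") on top of (r, p+"1").
def genBGo : List (HTree × String) → PySem.Dict String String → PySem.Dict String String
  | [], m => m
  | (n, p) :: st, m =>
    match n with
    | .nil => genBGo st m
    | .node _ s l r =>
      if s ≠ "" then genBGo st (m.insert s p)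
      else genBGo ((l, p ++ "0") :: (r, p ++ "1") :: st) m
termination_by st m => (st.map (fun q => q.1.size)).sum
decreasing_by
  all_goals simp [HTree.size]
  all_goals omega

def genB (root : HTree) : PySem.Dict String String := genBGo [(root, "")] PySem.Dict.empty

def encodeB (t : String) (m : PySem.Dict String String) : String :=
  PySem.Str.join "" (t.toList.map (fun ch => (m.get? (String.singleton ch)).getD ""))

def invB (m : PySem.Dict String String) : PySem.Dict String String :=
  m.items.foldl (fun d p => d.insert p.2 p.1) PySem.Dict.empty

def decodeB (e : String) (inv : PySem.Dict String String) : String :=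
  let st := e.toList.foldl
    (fun (acc : List String × String) b =>
      let c := acc.2.push b
      if inv.contains c then (acc.1 ++ [(inv.get? c).getD ""], "") else (acc.1, c))
    ([], "")
  PySem.Str.join "" st.1

def huffman_process_alt (t : String) : (List (String × String)) × String × String :=
  let root := loopB (initNodesB t)
  let m := genB root
  let e := encodeB t m
  let d := decodeB e (invB m)
  (m.items, e, d)

-- ===== PRECONDITION & SPEC =====
-- A raises ValueError on the empty string; everywhere else it returns normally.
def Pre_huffman_process (t : String) : Prop := t ≠ ""
instance (t : String) : Decidable (Pre_huffman_process t) := by unfold Pre_huffman_process; infer_instance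

def pvWitness_huffman_process : String := "abca"

def Spec_huffman_process (t : String) (out : (List (String × String)) × String × String) : Prop := out = huffman_process_alt t
instance (t : String) (out : (List (String × String)) × String × String) : Decidable (Spec_huffman_process t out) := by unfold Spec_huffman_process; infer_instance

-- ===== CLAIM (what is proved, stated in full; the proofs are below) =====
def Claim_equal_huffman_process : Prop := ∀ (t : String), Dom_huffman_process t → Pre_huffman_process t → Spec_huffman_process t (huffman_process t)

-- ===== LEMMAS AND PROOFS =====

-- The tuple order is a total order with eq ↔ equality.
theorem intCmp_eq_iff {a b : Int} : intCmp a b = .eq ↔ a = b := by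
  unfold intCmp; split_ifs <;> simp <;> omega

theorem intCmp_swap (a b : Int) : intCmp b a = (intCmp a b).swap := by
  unfold intCmp; split_ifs <;> simp [Ordering.swap] <;> omega

theorem intCmp_lt_trans {a b c : Int} (h1 : intCmp a b = .lt) (h2 : intCmp b c = .lt) :
    intCmp a c = .lt := by
  unfold intCmp at *; split_ifs at * <;> simp_all <;> omega

theorem charCmp_eq_iff {a b : Char} : charCmp a b = .eq ↔ a = b := by
  unfold charCmp
  split_ifs with h1 h2
  · simp; intro h; subst h; omega
  · simp; intro h; subst h; omega
  · have hn : a.toNat = b.toNat := by omega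
    have hab : a = b := Char.ext (UInt32.toNat_inj.mp hn)
    simp [hab]

theorem charCmp_swap (a b : Char) : charCmp b a = (charCmp a b).swap := by
  unfold charCmp; split_ifs <;> simp [Ordering.swap] <;> omega

theorem charCmp_lt_trans {a b c : Char} (h1 : charCmp a b = .lt) (h2 : charCmp b c = .lt) :
    charCmp a c = .lt := by
  unfold charCmp at *; split_ifs at * <;> simp_all <;> omega

theorem charsCmp_self (a : List Char) : charsCmp a a = .eq := by
  induction a with
  | nil => simp [charsCmp]
  | cons x xs ih => simp [charsCmp, charCmp_eq_iff.mpr rfl, ih]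

theorem charsCmp_eq_iff : ∀ {a b : List Char}, charsCmp a b = .eq ↔ a = b := by
  intro a
  induction a with
  | nil => intro b; cases b <;> simp [charsCmp]
  | cons x xs ih =>
    intro b
    cases b with
    | nil => simp [charsCmp]
    | cons y ys =>
      simp only [charsCmp]
      cases hc : charCmp x y with
      | lt => simp; intro h; rw [h, charCmp_eq_iff.mpr rfl] at hc; exact absurd hc (by simp)
      | gt => simp; intro h; rw [h, charCmp_eq_iff.mpr rfl] at hc; exact absurd hc (by simp)
      | eq => have := charCmp_eq_iff.mp hc; simp [this, ih]

theorem charsCmp_swap : ∀ (a b : List Char), charsCmp b a = (charsCmp a b).swap := by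
  intro a
  induction a with
  | nil => intro b; cases b <;> simp [charsCmp, Ordering.swap]
  | cons x xs ih =>
    intro b
    cases b with
    | nil => simp [charsCmp, Ordering.swap]
    | cons y ys =>
      simp only [charsCmp, charCmp_swap x y]
      cases charCmp x y <;> simp [Ordering.swap, ih ys]

theorem charsCmp_lt_trans : ∀ {a b c : List Char},
    charsCmp a b = .lt → charsCmp b c = .lt → charsCmp a c = .lt := by
  intro a
  induction a with
  | nil =>
    intro b c h1 h2
    cases b <;> cases c <;> simp_all [charsCmp]
  | cons x xs ih =>
    intro b c h1 h2
    cases b with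
    | nil => simp [charsCmp] at h1
    | cons y ys =>
      cases c with
      | nil => simp [charsCmp] at h2
      | cons z zs =>
        simp only [charsCmp] at h1 h2 ⊢
        cases h1' : charCmp x y <;> rw [h1'] at h1
        · cases h2' : charCmp y z <;> rw [h2'] at h2
          · rw [charCmp_lt_trans h1' h2']
          · rw [← charCmp_eq_iff.mp h2', h1']
          · simp at h2
        · have hxy := charCmp_eq_iff.mp h1'
          subst hxy
          cases h2' : charCmp x z <;> rw [h2'] at h2
          · exact ih h1 h2
          · simp at h2
        · simp at h1

theorem treeCmp_self (a : HTree) : treeCmp a a = .eq := by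
  induction a with
  | nil => simp [treeCmp]
  | node c s l r ihl ihr =>
    simp [treeCmp, intCmp_eq_iff.mpr rfl, charsCmp_self, ihl, ihr]

theorem treeCmp_eq_iff : ∀ {a b : HTree}, treeCmp a b = .eq ↔ a = b := by
  intro a
  induction a with
  | nil => intro b; cases b <;> simp [treeCmp]
  | node c s l r ihl ihr =>
    intro b
    cases b with
    | nil => simp [treeCmp]
    | node c' s' l' r' =>
      simp only [treeCmp]
      cases hi : intCmp c c' with
      | lt =>
        simp; intro h; subst h; rw [intCmp_eq_iff.mpr rfl] at hi; exact absurd hi (by simp)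
      | gt =>
        simp; intro h; subst h; rw [intCmp_eq_iff.mpr rfl] at hi; exact absurd hi (by simp)
      | eq =>
        have hc := intCmp_eq_iff.mp hi; subst hc
        cases hs : charsCmp s.toList s'.toList with
        | lt =>
          simp; intro h; subst h
          rw [charsCmp_self] at hs; exact absurd hs (by simp)
        | gt =>
          simp; intro h; subst h
          rw [charsCmp_self] at hs; exact absurd hs (by simp)
        | eq =>
          have hseq : s = s' := String.toList_inj.mp (charsCmp_eq_iff.mp hs)
          subst hseq
          cases hl : treeCmp l l' with
          | lt =>
            simp; intro h; subst h
            rw [treeCmp_self] at hl; exact absurd hl (by simp)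
          | gt =>
            simp; intro h; subst h
            rw [treeCmp_self] at hl; exact absurd hl (by simp)
          | eq =>
            have := ihl.mp hl; subst this
            simp [ihr]

theorem treeCmp_swap : ∀ (a b : HTree), treeCmp b a = (treeCmp a b).swap := by
  intro a
  induction a with
  | nil => intro b; cases b <;> simp [treeCmp, Ordering.swap]
  | node c s l r ihl ihr =>
    intro b
    cases b with
    | nil => simp [treeCmp, Ordering.swap]
    | node c' s' l' r' =>
      simp only [treeCmp, intCmp_swap c c', charsCmp_swap s.toList s'.toList, ihl l', ihr r']
      cases intCmp c c' <;> simp [Ordering.swap] <;>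
        (cases charsCmp s.toList s'.toList <;> simp [Ordering.swap] <;>
          (cases treeCmp l l' <;> simp [Ordering.swap]))

theorem treeCmp_lt_trans : ∀ {a b c : HTree},
    treeCmp a b = .lt → treeCmp b c = .lt → treeCmp a c = .lt := by
  intro a
  induction a with
  | nil =>
    intro b c h1 h2
    cases b with
    | nil => simp [treeCmp] at h1
    | node cb sb lb rb =>
      cases c with
      | nil => simp [treeCmp] at h2
      | node cc sc lc rc => simp [treeCmp]
  | node ca sa la ra ihl ihr =>
    intro b c h1 h2
    cases b with
    | nil => simp [treeCmp] at h1
    | node cb sb lb rb =>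
      cases c with
      | nil => simp [treeCmp] at h2
      | node cc sc lc rc =>
        simp only [treeCmp] at h1 h2 ⊢
        cases hi1 : intCmp ca cb <;> rw [hi1] at h1
        · cases hi2 : intCmp cb cc <;> rw [hi2] at h2
          · rw [intCmp_lt_trans hi1 hi2]
          · rw [← intCmp_eq_iff.mp hi2, hi1]
          · simp at h2
        · have := intCmp_eq_iff.mp hi1
          subst this
          cases hi2 : intCmp ca cc <;> rw [hi2] at h2
          · cases hs1 : charsCmp sa.toList sb.toList <;> rw [hs1] at h1
            · cases hs2 : charsCmp sb.toList sc.toList <;> rw [hs2] at h2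
              · rw [charsCmp_lt_trans hs1 hs2]
              · have : sb = sc := String.toList_inj.mp (charsCmp_eq_iff.mp hs2)
                subst this; rw [hs1]
              · simp at h2
            · have : sa = sb := String.toList_inj.mp (charsCmp_eq_iff.mp hs1)
              subst this
              cases hs2 : charsCmp sa.toList sc.toList <;> rw [hs2] at h2
              · cases hl1 : treeCmp la lb <;> rw [hl1] at h1
                · cases hl2 : treeCmp lb lc <;> rw [hl2] at h2
                  · rw [ihl hl1 hl2]
                  · rw [← treeCmp_eq_iff.mp hl2, hl1]
                  · simp at h2
                · have := treeCmp_eq_iff.mp hl1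
                  subst this
                  cases hl2 : treeCmp la lc <;> rw [hl2] at h2
                  · exact ihr h1 h2
                  · simp at h2
                · simp at h1
              · simp at h2
            · simp at h1
          · simp at h2
        · simp at h1

theorem treeLe_refl (a : HTree) : treeLe a a = true := by
  simp [treeLe, treeCmp_self]

theorem treeLe_antisymm {a b : HTree} (h1 : treeLe a b = true) (h2 : treeLe b a = true) :
    a = b := by
  simp [treeLe] at h1 h2
  cases h : treeCmp a b with
  | eq => exact treeCmp_eq_iff.mp h
  | gt => exact absurd h h1
  | lt => rw [treeCmp_swap, h] at h2; simp [Ordering.swap] at h2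

theorem treeLe_trans (a b c : HTree) (h1 : treeLe a b = true) (h2 : treeLe b c = true) :
    treeLe a c = true := by
  simp only [treeLe, bne_iff_ne, ne_eq, decide_eq_true_eq] at *
  cases hab : treeCmp a b with
  | gt => exact absurd hab h1
  | eq => rw [treeCmp_eq_iff.mp hab]; exact h2
  | lt =>
    cases hbc : treeCmp b c with
    | gt => exact absurd hbc h2
    | eq => rw [← treeCmp_eq_iff.mp hbc]; simp [hab]
    | lt => simp [treeCmp_lt_trans hab hbc]

theorem treeLe_total (a b : HTree) : (treeLe a b || treeLe b a) = true := by
  simp only [treeLe, treeCmp_swap a b]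
  cases treeCmp a b <;> rfl

theorem treeLe_of_lt {a b : HTree} (h : treeCmp a b = .lt) : treeLe a b = true := by
  simp [treeLe, h]

theorem popmin_perm : ∀ {l : List HTree} {m : HTree} {rest : List HTree},
    popmin l = some (m, rest) → l.Perm (m :: rest) := by
  intro l
  induction l with
  | nil => intro m rest h; simp [popmin] at h
  | cons x xs ih =>
    intro m rest h
    simp only [popmin] at h
    cases hp : popmin xs with
    | none =>
      rw [hp] at h
      dsimp only [] at h
      rw [Option.some.injEq, Prod.mk.injEq] at h
      obtain ⟨hm, hrest⟩ := h
      subst hm; subst hrest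
      cases xs with
      | nil => exact List.Perm.refl _
      | cons y ys => exfalso; have := popmin_cons_isSome y ys; rw [hp] at this; simp at this
    | some p =>
      obtain ⟨m', rest'⟩ := p
      rw [hp] at h
      dsimp only [] at h
      by_cases hc : treeCmp m' x = .lt
      · rw [if_pos hc, Option.some.injEq, Prod.mk.injEq] at h
        obtain ⟨hm, hrest⟩ := h
        subst hm; subst hrest
        exact ((ih hp).cons x).trans (List.Perm.swap m' x rest')
      · rw [if_neg hc, Option.some.injEq, Prod.mk.injEq] at h
        obtain ⟨hm, hrest⟩ := h
        subst hm; subst hrest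
        exact List.Perm.refl _

theorem popmin_min : ∀ {l : List HTree} {m : HTree} {rest : List HTree},
    popmin l = some (m, rest) → ∀ x ∈ l, treeLe m x = true := by
  intro l
  induction l with
  | nil => intro m rest h; simp [popmin] at h
  | cons x xs ih =>
    intro m rest h y hy
    simp only [popmin] at h
    cases hp : popmin xs with
    | none =>
      rw [hp] at h
      dsimp only [] at h
      rw [Option.some.injEq, Prod.mk.injEq] at h
      obtain ⟨hm, _⟩ := h
      subst hm
      cases xs with
      | nil =>
        rcases List.mem_cons.mp hy with hy | hy
        · subst hy; exact treeLe_refl _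
        · simp at hy
      | cons z zs =>
        exfalso; have := popmin_cons_isSome z zs; rw [hp] at this; simp at this
    | some p =>
      obtain ⟨m', rest'⟩ := p
      rw [hp] at h
      dsimp only [] at h
      by_cases hc : treeCmp m' x = .lt
      · -- the min of xs is strictly below x
        rw [if_pos hc, Option.some.injEq, Prod.mk.injEq] at h
        obtain ⟨hm, _⟩ := h
        subst hm
        rcases List.mem_cons.mp hy with hy | hy
        · subst hy; exact treeLe_of_lt hc
        · exact ih hp y hy
      · -- x is kept: x ≤ the min of xs ≤ every element of xs
        rw [if_neg hc, Option.some.injEq, Prod.mk.injEq] at h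
        obtain ⟨hm, _⟩ := h
        subst hm
        have hxm' : treeLe x m' = true := by
          simp only [treeLe, bne_iff_ne, ne_eq, decide_eq_true_eq]
          rw [treeCmp_swap m' x]
          cases hcc : treeCmp m' x
          · exact absurd hcc hc
          · simp [Ordering.swap]
          · simp [Ordering.swap]
        rcases List.mem_cons.mp hy with hy | hy
        · subst hy; exact treeLe_refl _
        · exact treeLe_trans _ _ _ hxm' (ih hp y hy)

-- step lemmas to unfold the two loops
theorem loopA_short {h : List HTree} (hl : h.length ≤ 1) : loopA h = h.headD .nil := by
  rw [loopA]; simp [hl]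

theorem loopA_step {h : List HTree} {l1 l2 : HTree} {h1 h2 : List HTree}
    (hl : ¬ h.length ≤ 1) (hp : popmin h = some (l1, h1)) (hp2 : popmin h1 = some (l2, h2)) :
    loopA h = loopA (h2 ++ [HTree.node (l1.count + l2.count) "" l1 l2]) := by
  rw [loopA]
  rw [dif_neg hl]
  split
  · rename_i heq; rw [heq] at hp; simp at hp
  · rename_i l' h1' heq
    rw [heq] at hp
    simp at hp
    obtain ⟨h1l, h1r⟩ := hp; subst h1l; subst h1r
    split
    · rename_i heq2; rw [heq2] at hp2; simp at hp2
    · rename_i r' h2' heq2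
      rw [heq2] at hp2
      simp at hp2
      obtain ⟨h2l, h2r⟩ := hp2; subst h2l; subst h2r
      rfl

theorem loopB_short {h : List HTree} (hl : h.length ≤ 1) : loopB h = h.headD .nil := by
  rw [loopB]; simp [hl]

theorem loopB_step {h : List HTree} {a b : HTree} {rest : List HTree}
    (hl : ¬ h.length ≤ 1) (hs : h.mergeSort treeLe = a :: b :: rest) :
    loopB h = loopB (rest ++ [HTree.node (a.count + b.count) "" a b]) := by
  rw [loopB]
  rw [dif_neg hl]
  split
  · rename_i a' b' rest' heq
    rw [heq] at hs
    simp at hs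
    obtain ⟨h1, h2, h3⟩ := hs; subst h1; subst h2; subst h3
    rfl
  · rename_i hne
    rw [hs] at hne
    exact absurd rfl (hne a b rest)

-- THE CORE: popping two minima from a list equals taking the first two of its stable sort
theorem loop_eq : ∀ (n : Nat) (hA hB : List HTree), hA.length ≤ n → hA.Perm hB →
    loopA hA = loopB hB := by
  intro n
  induction n with
  | zero =>
    intro hA hB hlen hperm
    have : hA = [] := List.length_eq_zero_iff.mp (Nat.le_zero.mp hlen)
    subst this
    have : hB = [] := hperm.nil_eq.symm
    subst this
    rw [loopA_short (by simp), loopB_short (by simp)]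
  | succ n ih =>
    intro hA hB hlen hperm
    by_cases hshort : hA.length ≤ 1
    · have hAB : hA = hB := by
        match hA, hshort with
        | [], _ => exact hperm.nil_eq
        | [x], _ =>
          have := List.Perm.length_eq hperm
          match hB, this with
          | [y], _ =>
            have : x ∈ ([y] : List HTree) := hperm.mem_iff.mp (by simp)
            simp at this
            rw [this]
      rw [loopA_short hshort, loopB_short (hAB ▸ hshort), hAB]
    · -- length ≥ 2
      have hlenB : hB.length = hA.length := (List.Perm.length_eq hperm).symm
      -- pop the two minima on the A side
      obtain ⟨x, xs, hxe⟩ : ∃ x xs, hA = x :: xs := by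
        cases hA with
        | nil => simp at hshort
        | cons x xs => exact ⟨x, xs, rfl⟩
      obtain ⟨⟨l1, h1⟩, hp⟩ : ∃ p, popmin hA = some p := by
        rw [hxe]; exact Option.isSome_iff_exists.mp (popmin_cons_isSome x xs)
      have hlen1 : h1.length + 1 = hA.length := popmin_length hp
      obtain ⟨y, ys, hye⟩ : ∃ y ys, h1 = y :: ys := by
        cases h1 with
        | nil => simp at hlen1; omega
        | cons y ys => exact ⟨y, ys, rfl⟩
      obtain ⟨⟨l2, h2⟩, hp2⟩ : ∃ p, popmin h1 = some p := by
        rw [hye]; exact Option.isSome_iff_exists.mp (popmin_cons_isSome y ys)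
      have hlen2 : h2.length + 1 = h1.length := popmin_length hp2
      -- sort the B side
      have hsortperm : (hB.mergeSort treeLe).Perm hB := List.mergeSort_perm hB treeLe
      have hsortlen : (hB.mergeSort treeLe).length = hB.length := List.length_mergeSort hB
      obtain ⟨a, b, rest, hse⟩ : ∃ a b rest, hB.mergeSort treeLe = a :: b :: rest := by
        cases hsm : hB.mergeSort treeLe with
        | nil => rw [hsm] at hsortlen; simp at hsortlen; omega
        | cons a tl =>
          cases tl with
          | nil => rw [hsm] at hsortlen; simp at hsortlen; omega
          | cons b rest => exact ⟨a, b, rest, rfl⟩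
      have hpw : (hB.mergeSort treeLe).Pairwise (fun u v => treeLe u v = true) :=
        List.pairwise_mergeSort treeLe_trans treeLe_total hB
      rw [hse] at hpw
      have hpw_a := (List.pairwise_cons.mp hpw).1
      have hpw_tail := (List.pairwise_cons.mp hpw).2
      have hpw_b := (List.pairwise_cons.mp hpw_tail).1
      -- the multisets hA ~ hB ~ sorted
      have hAsorted : hA.Perm (a :: b :: rest) := hperm.trans (hsortperm.symm.trans (by rw [hse]))
      have hA1 : hA.Perm (l1 :: h1) := popmin_perm hp
      -- l1 = a
      have hl1a : l1 = a := by
        have hl1mem : l1 ∈ hA := hA1.symm.mem_iff.mp (by simp)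
        have hamem : a ∈ hA := hAsorted.symm.mem_iff.mp (by simp)
        have h1le : treeLe l1 a = true := popmin_min hp a hamem
        have h2le : treeLe a l1 = true := by
          rcases List.mem_cons.mp (hAsorted.mem_iff.mp hl1mem) with h | h
          · rw [h]; exact treeLe_refl _
          · rcases List.mem_cons.mp h with h' | h'
            · rw [h']; exact hpw_a b (by simp)
            · exact hpw_a l1 (by simp [h'])
        exact treeLe_antisymm h1le h2le
      subst hl1a
      -- h1 ~ b :: rest
      have hh1perm : h1.Perm (b :: rest) := by
        have : (l1 :: h1).Perm (l1 :: (b :: rest)) := hA1.symm.trans hAsorted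
        exact this.cons_inv
      -- l2 = b
      have hl2b : l2 = b := by
        have hl2mem : l2 ∈ h1 := (popmin_perm hp2).symm.mem_iff.mp (by simp)
        have hbmem : b ∈ h1 := hh1perm.symm.mem_iff.mp (by simp)
        have h1le : treeLe l2 b = true := popmin_min hp2 b hbmem
        have h2le : treeLe b l2 = true := by
          rcases List.mem_cons.mp (hh1perm.mem_iff.mp hl2mem) with h | h
          · rw [h]; exact treeLe_refl _
          · exact hpw_b l2 h
        exact treeLe_antisymm h1le h2le
      subst hl2b
      -- h2 ~ rest
      have hh2perm : h2.Perm rest := by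
        have : (l2 :: h2).Perm (l2 :: rest) := (popmin_perm hp2).symm.trans hh1perm
        exact this.cons_inv
      -- assemble the step
      rw [loopA_step hshort hp hp2, loopB_step (by omega) hse]
      exact ih _ _ (by simp; omega)
        (hh2perm.append (List.Perm.refl [HTree.node (l1.count + l2.count) "" l1 l2]))

-- stack-based code generation equals the recursive one
theorem genBGo_eq : ∀ (n : HTree) (p : String) (st : List (HTree × String))
    (m : PySem.Dict String String), genBGo ((n, p) :: st) m = genBGo st (genA n p m) := by
  intro n
  induction n with
  | nil => intro p st m; rw [genBGo]; rfl
  | node c s l r ihl ihr =>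
    intro p st m
    rw [genBGo]
    by_cases hs : s ≠ ""
    · rw [if_pos hs]; rw [genA]; rw [if_pos hs]
    · rw [if_neg hs]
      rw [ihl, ihr]
      rw [genA, if_neg hs]

theorem genB_eq_genA (root : HTree) : genB root = genA root "" PySem.Dict.empty := by
  rw [genB, genBGo_eq]
  rw [genBGo]

-- the verdict
theorem huffman_process_spec : Claim_equal_huffman_process := by
  intro t _ _
  unfold Spec_huffman_process
  have hroot : build_tree t = loopB (initNodesB t) := by
    unfold build_tree
    have hinit : initNodesA t = initNodesB t := rfl
    rw [hinit]
    exact loop_eq (initNodesB t).length _ _ (le_refl _) (List.Perm.refl _)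
  simp only [huffman_process, huffman_process_alt, hroot, genB_eq_genA,
    encodeA, encodeB, invA, invB, decodeA, decodeB]
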